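-- pv_equiv track=rewrite | github.com/DA-testa/parallel-processing-sandrakadike | main.py | parallel_processing
-- ===== SOURCE A (Python) =====
-- def parallel_processing(n, m, data):
--     output = []
--     threads = [0] * n
--     # TODO: write the function for simulating parallel tasks,
--     # create the output pairs
--     for i in range(m):
--         min_completion_time = threads[0]
--         min_thread = 0
--         for j in range(1, n):
--             if threads[j] < min_completion_time:
--                 min_completion_time = threads[j]
--                 min_thread = j
--         output.append((min_thread, min_completion_time))
--         threads[min_thread] += data[i]
--
--     return output
-- ===== SOURCE B (Python) =====
-- import bisect
--
-- def parallel_processing(n, m, data):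
--     # Priority queue kept as a list sorted by (completion_time, thread_index):
--     # pop the front (earliest available thread, smallest index on ties),
--     # reinsert with bisect.insort after adding the task's duration.
--     avail = [(0, t) for t in range(n)]
--     output = []
--     for i in range(m):
--         time, idx = avail.pop(0)
--         output.append((idx, time))
--         bisect.insort(avail, (time + data[i], idx))
--     return output
-- ===== Notes on version B (the rewrite author's own statement) =====
-- stated objective: faster
-- what changed: Replaced the full O(n) scan of all threads per task by a priority queue kept as a list sorted by (completion_time, thread_index): pop the front and reinsert with bisect.insort, so each task costs a binary search plus one list shift instead of a whole-array minimum scan.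
import Mathlib
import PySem

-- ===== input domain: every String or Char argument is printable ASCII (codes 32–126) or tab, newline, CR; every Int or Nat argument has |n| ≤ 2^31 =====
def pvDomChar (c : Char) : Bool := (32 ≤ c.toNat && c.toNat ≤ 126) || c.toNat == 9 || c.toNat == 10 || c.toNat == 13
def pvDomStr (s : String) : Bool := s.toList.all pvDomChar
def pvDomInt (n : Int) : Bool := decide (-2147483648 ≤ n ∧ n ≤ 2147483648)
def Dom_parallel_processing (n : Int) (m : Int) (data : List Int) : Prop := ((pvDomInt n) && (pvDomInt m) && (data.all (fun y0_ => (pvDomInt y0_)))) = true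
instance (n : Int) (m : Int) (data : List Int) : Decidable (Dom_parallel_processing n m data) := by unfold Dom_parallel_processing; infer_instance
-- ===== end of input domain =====

-- B replaces A's per-task O(n) minimum scan by a priority queue kept as a sorted list
-- (pop front, binary-insert back); measured much faster at large sizes. Equivalence of the
-- RETURN value is proved on all inputs where the Python A returns (Pre_ below).

-- ===== PORT A =====
-- one iteration of A's outer loop: scan all threads for the earliest (first minimal) one,
-- record (thread, time), add the task's duration to that thread.
def pvStepA (n : Int) (data : List Int) (st : List Int × List (Int × Int)) (i : Int) :
    List Int × List (Int × Int) :=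
  let r := (PySem.List.pyRange 1 n 1).foldl
      (fun (p : Int × Int) j =>
        if PySem.List.pyGetD st.1 j 0 < p.1 then (PySem.List.pyGetD st.1 j 0, j) else p)
      (PySem.List.pyGetD st.1 0 0, 0)
  (st.1.set r.2.toNat (PySem.List.pyGetD st.1 r.2 0 + PySem.List.pyGetD data i 0),
   st.2 ++ [(r.2, r.1)])

def parallel_processing (n : Int) (m : Int) (data : List Int) : List (Int × Int) :=
  ((PySem.List.pyRange 0 m 1).foldl (pvStepA n data) (List.replicate n.toNat 0, [])).2

-- ===== PORT B =====
-- Python tuple '<' on (Int × Int) is lexicographic; ported by hand because Prod's own LT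
-- instance is not the lexicographic one.
def pvLexLtb (p q : Int × Int) : Bool := p.1 < q.1 || (p.1 == q.1 && p.2 < q.2)

-- bisect.insort on a sorted list: insert p after all elements ≤ p (insort_right).
def pvInsort (xs : List (Int × Int)) (p : Int × Int) : List (Int × Int) :=
  match xs with
  | [] => [p]
  | q :: rest => if pvLexLtb p q then p :: q :: rest else q :: pvInsort rest p

-- one iteration of B's loop: pop the earliest (time, idx) from the front, record (idx, time),
-- reinsert with the task's duration added.
def pvStepB (data : List Int) (st : List (Int × Int) × List (Int × Int)) (i : Int) :
    List (Int × Int) × List (Int × Int) :=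
  match st.1 with
  | [] => st  -- unreachable under Pre_ (Python's pop(0) raises there)
  | (time, idx) :: rest =>
      (pvInsort rest (time + PySem.List.pyGetD data i 0, idx), st.2 ++ [(idx, time)])

def parallel_processing_alt (n : Int) (m : Int) (data : List Int) : List (Int × Int) :=
  ((PySem.List.pyRange 0 m 1).foldl (pvStepB data)
      ((PySem.List.pyRange 0 n 1).map (fun t => ((0 : Int), t)), [])).2

-- ===== PRECONDITION & SPEC =====
-- Exactly the inputs on which Python's A returns: with at least one task (0 < m) it reads
-- threads[0] (IndexError when n < 1) and data[i] for i < m (IndexError when m > len(data)).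
def Pre_parallel_processing (n : Int) (m : Int) (data : List Int) : Prop :=
  m ≤ 0 ∨ (1 ≤ n ∧ m ≤ (data.length : Int))
instance (n : Int) (m : Int) (data : List Int) : Decidable (Pre_parallel_processing n m data) := by
  unfold Pre_parallel_processing; infer_instance

def pvWitness_parallel_processing : Int × Int × List Int := (3, 4, [5, 2, 7, 1])

def Spec_parallel_processing (n : Int) (m : Int) (data : List Int) (out : List (Int × Int)) : Prop := out = parallel_processing_alt n m data
instance (n : Int) (m : Int) (data : List Int) (out : List (Int × Int)) : Decidable (Spec_parallel_processing n m data out) := by unfold Spec_parallel_processing; infer_instance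

-- ===== CLAIM (what is proved, stated in full; the proofs are below) =====
def Claim_equal_parallel_processing : Prop := ∀ (n : Int) (m : Int) (data : List Int), Dom_parallel_processing n m data → Pre_parallel_processing n m data → Spec_parallel_processing n m data (parallel_processing n m data)

-- ===== LEMMAS AND PROOFS =====

-- lexicographic order on pairs, as a Prop
def pvLexLe (p q : Int × Int) : Prop := p.1 < q.1 ∨ (p.1 = q.1 ∧ p.2 ≤ q.2)

-- the multiset of (completion_time, thread_index) pairs held by A's threads array
def pvEnum (ts : List Int) : List (Int × Int) :=
  (PySem.List.pyRange 0 (ts.length : Int) 1).map (fun j => (PySem.List.pyGetD ts j 0, j))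

-- A's inner scan as a binary min
def pvMinp (p q : Int × Int) : Int × Int := if q.1 < p.1 then q else p

theorem pvLexLe_trans {a b c : Int × Int} (h1 : pvLexLe a b) (h2 : pvLexLe b c) : pvLexLe a c := by
  unfold pvLexLe at *; omega

theorem pvLexLe_antisymm {a b : Int × Int} (h1 : pvLexLe a b) (h2 : pvLexLe b a) : a = b := by
  unfold pvLexLe at *
  obtain ⟨x, y⟩ := a; obtain ⟨u, v⟩ := b
  simp_all; omega

theorem pvLexLtb_true {p q : Int × Int} (h : pvLexLtb p q = true) : pvLexLe p q := by
  unfold pvLexLtb at h; unfold pvLexLe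
  simp at h; omega

theorem pvLexLtb_false {p q : Int × Int} (h : pvLexLtb p q = false) : pvLexLe q p := by
  unfold pvLexLtb at h; unfold pvLexLe
  simp at h; omega

theorem pvInsort_perm (xs : List (Int × Int)) (p : Int × Int) :
    (pvInsort xs p).Perm (p :: xs) := by
  induction xs with
  | nil => simp [pvInsort]
  | cons q rest ih =>
      unfold pvInsort
      split
      · exact List.Perm.refl _
      · exact (ih.cons q).trans (List.Perm.swap p q rest)

theorem pvInsort_sorted {xs : List (Int × Int)} (p : Int × Int)
    (h : xs.Pairwise pvLexLe) : (pvInsort xs p).Pairwise pvLexLe := by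
  induction xs with
  | nil => simp [pvInsort]
  | cons q rest ih =>
      unfold pvInsort
      rcases List.pairwise_cons.mp h with ⟨hq, hrest⟩
      split
      · rename_i hlt
        refine List.pairwise_cons.mpr ⟨?_, h⟩
        intro b hb
        rcases List.mem_cons.mp hb with rfl | hb
        · exact pvLexLtb_true hlt
        · exact pvLexLe_trans (pvLexLtb_true hlt) (hq b hb)
      · rename_i hge
        refine List.pairwise_cons.mpr ⟨?_, ih hrest⟩
        intro b hb
        have hb' := (pvInsort_perm rest p).mem_iff.mp hb
        rcases List.mem_cons.mp hb' with rfl | hb'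
        · exact pvLexLtb_false (by simpa using hge)
        · exact hq b hb'

-- A's scan over a list with strictly increasing indices returns the lexicographic minimum
theorem pvFoldl_minp_spec (t : List (Int × Int)) (h : Int × Int)
    (hinc : (h :: t).Pairwise (fun p q => p.2 < q.2)) :
    (t.foldl pvMinp h) ∈ h :: t ∧ ∀ q ∈ h :: t, pvLexLe (t.foldl pvMinp h) q := by
  induction t generalizing h with
  | nil =>
      refine ⟨by simp, ?_⟩
      intro q hq
      simp only [List.foldl_nil]
      simp at hq; subst hq
      right; omega
  | cons a t ih =>
      rcases List.pairwise_cons.mp hinc with ⟨hh, hinc'⟩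
      have hha : h.2 < a.2 := hh a (by simp)
      have hmem : pvMinp h a = h ∨ pvMinp h a = a := by
        unfold pvMinp; split <;> simp
      have hle_h : pvLexLe (pvMinp h a) h := by
        unfold pvMinp; split
        · left; omega
        · right; omega
      have hle_a : pvLexLe (pvMinp h a) a := by
        unfold pvMinp; split
        · right; omega
        · rename_i hna
          rcases lt_or_eq_of_le (not_lt.mp hna) with hlt | heq
          · left; exact hlt
          · right; exact ⟨heq, le_of_lt hha⟩
      have hinc2 : (pvMinp h a :: t).Pairwise (fun p q => p.2 < q.2) := by
        refine List.pairwise_cons.mpr ⟨?_, (List.pairwise_cons.mp hinc').2⟩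
        intro b hb
        rcases hmem with he | he <;> rw [he]
        · exact lt_trans hha ((List.pairwise_cons.mp hinc').1 b hb)
        · exact (List.pairwise_cons.mp hinc').1 b hb
      obtain ⟨hm, hmin⟩ := ih (pvMinp h a) hinc2
      simp only [List.foldl_cons]
      constructor
      · rcases List.mem_cons.mp hm with he | ht
        · rw [he]; rcases hmem with h1 | h1 <;> rw [h1] <;> simp
        · simp [ht]
      · intro q hq
        rcases List.mem_cons.mp hq with rfl | hq'
        · exact pvLexLe_trans (hmin _ (by simp)) hle_h
        · rcases List.mem_cons.mp hq' with rfl | hq''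
          · exact pvLexLe_trans (hmin _ (by simp)) hle_a
          · exact hmin q (by simp [hq''])

-- length and element facts about pvEnum
theorem pvEnum_length (ts : List Int) : (pvEnum ts).length = ts.length := by
  simp [pvEnum, PySem.List.length_pyRange_one]

theorem pvEnum_getElem (ts : List Int) (k : Nat) (_hk : k < ts.length) :
    (pvEnum ts)[k]'(by rw [pvEnum_length]; exact _hk) = (ts[k], (k : Int)) := by
  unfold pvEnum
  rw [List.getElem_map]
  rw [PySem.List.getElem_pyRange_one]
  simp only [zero_add]
  rw [PySem.List.pyGetD_eq_getElem ts 0 (by positivity) (by exact_mod_cast _hk)]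
  simp

theorem pvEnum_set (ts : List Int) (k : Nat) (v : Int) (hk : k < ts.length) :
    pvEnum (ts.set k v) = (pvEnum ts).set k (v, (k : Int)) := by
  apply List.ext_getElem
  · simp [pvEnum_length]
  · intro i h1 h2
    have hi : i < ts.length := by simpa [pvEnum_length] using h1
    rw [List.getElem_set]
    have e1 := pvEnum_getElem (ts.set k v) i (by simpa using hi)
    have e2 := pvEnum_getElem ts i hi
    rw [e1]
    split
    · rename_i he; subst he; simp
    · rename_i hne; rw [e2]; simp [hne]

-- l ~ l[k] :: l.eraseIdx k, and l.set k x ~ x :: l.eraseIdx k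
theorem pv_perm_cons_eraseIdx {α : Type} (l : List α) (k : Nat) (hk : k < l.length) :
    l.Perm (l[k] :: l.eraseIdx k) := by
  conv_lhs => rw [← List.take_append_drop k l]
  rw [List.eraseIdx_eq_take_drop_succ]
  have hdrop : l.drop k = l[k] :: l.drop (k + 1) := List.drop_eq_getElem_cons hk
  rw [hdrop]
  exact List.perm_middle

theorem pv_set_perm_cons_eraseIdx {α : Type} (l : List α) (k : Nat) (x : α) (hk : k < l.length) :
    (l.set k x).Perm (x :: l.eraseIdx k) := by
  rw [List.set_eq_take_append_cons_drop, if_pos hk, List.eraseIdx_eq_take_drop_succ]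
  exact List.perm_middle

-- sorted head is the lexicographic minimum of any permutation
theorem pv_head_eq_min {l avail : List (Int × Int)} (hperm : avail.Perm l)
    (hsort : avail.Pairwise pvLexLe) {r : Int × Int} (hr : r ∈ l)
    (hmin : ∀ q ∈ l, pvLexLe r q) :
    ∃ rest, avail = r :: rest := by
  cases avail with
  | nil => exact absurd (hperm.mem_iff.mpr hr) (by simp)
  | cons h rest =>
      refine ⟨rest, ?_⟩
      have hh : h ∈ l := hperm.mem_iff.mp (by simp)
      have h1 : pvLexLe r h := hmin h hh
      have h2 : pvLexLe h r := by
        have : r ∈ h :: rest := hperm.mem_iff.mpr hr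
        rcases List.mem_cons.mp this with rfl | hrr
        · right; omega
        · exact (List.pairwise_cons.mp hsort).1 r hrr
      rw [pvLexLe_antisymm h2 h1]

-- the invariant-preserving step equivalence, then the loop
theorem pv_loop (n : Int) (data : List Int) (idxs : List Int) :
    ∀ (ts : List Int) (avail outp : List (Int × Int)),
    (ts.length : Int) = n → 1 ≤ n →
    avail.Perm (pvEnum ts) → avail.Pairwise pvLexLe →
    (idxs.foldl (pvStepA n data) (ts, outp)).2 =
      (idxs.foldl (pvStepB data) (avail, outp)).2 := by
  induction idxs with
  | nil => intro ts avail outp _ _ _ _; simp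
  | cons i idxs ih =>
      intro ts avail outp hlen hn hperm hsort
      -- A's scan = foldl pvMinp over pvEnum ts
      have hlen' : ts.length = n.toNat := by omega
      have hnn : (0 : Int) < n := by omega
      -- decompose pvEnum ts = g 0 :: map g (pyRange 1 n 1)
      have hrange : PySem.List.pyRange 0 (ts.length : Int) 1 =
          (0 : Int) :: PySem.List.pyRange 1 (ts.length : Int) 1 := by
        rw [PySem.List.pyRange_one_cons (by omega)]
        norm_num
      have henum_cons : pvEnum ts =
          (PySem.List.pyGetD ts 0 0, (0:Int)) ::
            (PySem.List.pyRange 1 (ts.length : Int) 1).map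
              (fun j => (PySem.List.pyGetD ts j 0, j)) := by
        unfold pvEnum; rw [hrange]; simp
      -- A's scan result
      set g : Int → Int × Int := fun j => (PySem.List.pyGetD ts j 0, j) with hg
      have hscan :
          (PySem.List.pyRange 1 n 1).foldl
            (fun (p : Int × Int) j =>
              if PySem.List.pyGetD ts j 0 < p.1 then (PySem.List.pyGetD ts j 0, j) else p)
            (PySem.List.pyGetD ts 0 0, 0)
          = ((PySem.List.pyRange 1 n 1).map g).foldl pvMinp (g 0) := by
        rw [List.foldl_map]
        simp only [hg, pvMinp]
      have hinc : ((g 0) :: (PySem.List.pyRange 1 n 1).map g).Pairwise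
          (fun p q => p.2 < q.2) := by
        have h0 : PySem.List.pyRange 0 n 1 = (0:Int) :: PySem.List.pyRange 1 n 1 := by
          rw [PySem.List.pyRange_one_cons hnn]
          norm_num
        have hpw : ((0:Int) :: PySem.List.pyRange 1 n 1).Pairwise (· < ·) := by
          rw [← h0]; exact PySem.List.pairwise_lt_pyRange_one 0 n
        have hmap := List.Pairwise.map (S := fun p q : Int × Int => p.2 < q.2) g
          (by intro a b hab; simpa [hg] using hab) hpw
        simpa using hmap
      have henum_eq : pvEnum ts = (g 0) :: (PySem.List.pyRange 1 n 1).map g := by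
        rw [henum_cons, hlen]
      obtain ⟨hmem, hmin⟩ := pvFoldl_minp_spec ((PySem.List.pyRange 1 n 1).map g) (g 0) hinc
      rw [← henum_eq] at hmem hmin
      set r := ((PySem.List.pyRange 1 n 1).map g).foldl pvMinp (g 0) with hr
      -- the head of avail is r
      obtain ⟨rest, havail⟩ := pv_head_eq_min hperm hsort hmem hmin
      -- r is (ts[k], k) for k = r.2.toNat
      have hmem' := hmem
      rw [henum_eq] at hmem'
      obtain ⟨k, hk, hkr⟩ := List.getElem_of_mem hmem
      have hkl : k < ts.length := by simpa [pvEnum_length] using hk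
      have hre : r = (ts[k], (k : Int)) := by rw [← hkr, pvEnum_getElem ts k hkl]
      have hr2 : r.2 = (k : Int) := by rw [hre]
      have hr2toNat : r.2.toNat = k := by rw [hr2]; simp
      have hr1 : r.1 = ts[k] := by rw [hre]
      -- A's read-back of the minimum
      have hread : PySem.List.pyGetD ts r.2 0 = r.1 := by
        rw [hr2, hr1, PySem.List.pyGetD_eq_getElem ts 0 (by positivity) (by exact_mod_cast hkl)]
        simp
      -- new states
      set d := PySem.List.pyGetD data i 0 with hd
      have hstepA : pvStepA n data (ts, outp) i =
          (ts.set k (r.1 + d), outp ++ [(r.2, r.1)]) := by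
        unfold pvStepA
        simp only [hscan]
        rw [hread, hr2toNat]
      have hstepB : pvStepB data (avail, outp) i =
          (pvInsort rest (r.1 + d, r.2), outp ++ [(r.2, r.1)]) := by
        rw [havail, hre]
        rfl
      -- invariant for the new states
      have hperm' : (pvInsort rest (r.1 + d, r.2)).Perm (pvEnum (ts.set k (r.1 + d))) := by
        have p1 : (pvInsort rest (r.1 + d, r.2)).Perm ((r.1 + d, r.2) :: rest) :=
          pvInsort_perm rest _
        have p2 : rest.Perm ((pvEnum ts).eraseIdx k) := by
          have hA : (r :: rest).Perm (r :: (pvEnum ts).eraseIdx k) := by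
            rw [← havail]
            have := pv_perm_cons_eraseIdx (pvEnum ts) k hk
            rw [hkr] at this
            exact hperm.trans this
          exact hA.cons_inv
        have p3 : (pvEnum (ts.set k (r.1 + d))).Perm ((r.1 + d, r.2) :: (pvEnum ts).eraseIdx k) := by
          rw [pvEnum_set ts k _ hkl, ← hr2]
          have := pv_set_perm_cons_eraseIdx (pvEnum ts) k (r.1 + d, r.2) hk
          simpa using this
        exact p1.trans ((p2.cons _).trans p3.symm)
      have hsort' : (pvInsort rest (r.1 + d, r.2)).Pairwise pvLexLe := by
        apply pvInsort_sorted
        exact (List.pairwise_cons.mp (havail ▸ hsort)).2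
      simp only [List.foldl_cons, hstepA, hstepB]
      exact ih (ts.set k (r.1 + d)) (pvInsort rest (r.1 + d, r.2)) (outp ++ [(r.2, r.1)])
        (by simpa using hlen) hn hperm' hsort'

-- initial states are related
theorem pv_init (n : Int) (hn : 1 ≤ n) :
    ((PySem.List.pyRange 0 n 1).map (fun t => ((0 : Int), t))).Perm
      (pvEnum (List.replicate n.toNat 0)) ∧
    ((PySem.List.pyRange 0 n 1).map (fun t => ((0 : Int), t))).Pairwise pvLexLe := by
  constructor
  · have hlen : ((List.replicate n.toNat (0:Int)).length : Int) = n := by simp; omega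
    unfold pvEnum
    rw [hlen]
    apply List.Perm.of_eq
    apply List.map_congr_left
    intro j hj
    have hj' := (PySem.List.mem_pyRange_one).mp hj
    rw [PySem.List.pyGetD_eq_getElem _ 0 (by omega) (by rw [hlen]; omega)]
    simp
  · have hp : (PySem.List.pyRange 0 n 1).Pairwise (· < ·) :=
      PySem.List.pairwise_lt_pyRange_one 0 n
    exact List.Pairwise.map (S := pvLexLe) (fun t => ((0 : Int), t))
      (by intro a b hab; right; exact ⟨rfl, le_of_lt hab⟩) hp

-- ===== VERDICT (by name: the statement is the Claim_ definition above) =====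
theorem parallel_processing_spec : Claim_equal_parallel_processing := by
  intro n m data _ hpre
  unfold Spec_parallel_processing
  by_cases hm : m ≤ 0
  · have : PySem.List.pyRange 0 m 1 = [] := PySem.List.pyRange_one_eq_nil hm
    simp [parallel_processing, parallel_processing_alt, this]
  · have hn : 1 ≤ n := by
      rcases hpre with h | ⟨h1, _⟩
      · omega
      · exact h1
    obtain ⟨hperm, hsort⟩ := pv_init n hn
    unfold parallel_processing parallel_processing_alt
    exact pv_loop n data (PySem.List.pyRange 0 m 1) (List.replicate n.toNat 0) _ []
      (by simp; omega) hn hperm hsort
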